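-- pv_equiv track=rewrite | github.com/CatilonyZhang/CriticGPT-Lean | math_tree/autoformalizer/autoformalizer/eval_utils/gpt_feedback.py | parse_formalization_status
-- ===== SOURCE A (Python) =====
-- def parse_formalization_status(response: str) -> str:
--     # Split the response into lines
--     lines = response.splitlines()
--
--     formalization_str = "Formalization Status:"
--
--     # Iterate over lines to find the "Formalization Status:" part
--     for i in range(1, len(lines) + 1):
--         line = lines[len(lines) - i]
--         if formalization_str in line:
--             # Extract the status after "Formalization Status:"
--             answer = line.split("Formalization Status:")[1].strip()
--             if "Correct" in answer:
--                 return "Correct"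
--             elif "Incorrect" in answer:
--                 return "Incorrect"
--
--     # If "Formalization Status:" is not found, return a default value
--     return "Status not found"
-- ===== SOURCE B (Python) =====
-- def _classify(line):
--     # Classification of one line: "Correct"/"Incorrect" if the line carries a
--     # classifying marker, else None.
--     if "Formalization Status:" not in line:
--         return None
--     answer = line.split("Formalization Status:")[1].strip()
--     if "Correct" in answer:
--         return "Correct"
--     if "Incorrect" in answer:
--         return "Incorrect"
--     return None
--
--
-- def parse_formalization_status(response: str) -> str:
--     # Staged pipeline: classify every line, collect the hits, take the last one.
--     hits = [h for h in map(_classify, response.splitlines()) if h is not None]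
--     return hits[-1] if hits else "Status not found"
-- ===== Notes on version B (the rewrite author's own statement) =====
-- stated objective: simpler
-- what changed: Replaces A's bottom-up indexed scan with early return (range(1,len+1), lines[len-i]) by a staged pipeline: classify every line with a helper, collect all classifications into a list, and return the last one (default if the list is empty).
import Mathlib
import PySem

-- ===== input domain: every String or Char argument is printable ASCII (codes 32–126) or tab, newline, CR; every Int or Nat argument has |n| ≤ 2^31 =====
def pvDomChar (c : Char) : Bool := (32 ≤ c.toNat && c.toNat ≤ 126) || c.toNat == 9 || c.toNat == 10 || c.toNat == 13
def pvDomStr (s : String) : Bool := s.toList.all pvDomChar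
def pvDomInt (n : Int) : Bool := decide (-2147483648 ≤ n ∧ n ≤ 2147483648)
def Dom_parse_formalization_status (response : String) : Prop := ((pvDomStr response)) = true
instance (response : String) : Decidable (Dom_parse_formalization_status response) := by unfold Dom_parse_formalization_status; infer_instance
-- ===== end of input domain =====

-- B replaces A's bottom-up indexed scan with early return by a staged pipeline:
-- classify every line with a helper, collect the hits, return the last (objective: simpler).

-- ===== PORT A =====
def parse_formalization_status (response : String) : String :=
  let lines := PySem.Str.splitlines response
  -- for i in range(1, len(lines)+1): … early returns encoded as findSome?
  ((PySem.List.pyRange 1 ((lines.length : Int) + 1) 1).findSome? (fun i =>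
      let line := PySem.List.pyGetD lines ((lines.length : Int) - i) ""
      if PySem.Str.isIn "Formalization Status:" line then
        let answer := PySem.Str.strip
          (List.getD ((PySem.Str.split? line "Formalization Status:").getD []) 1 "")
        if PySem.Str.isIn "Correct" answer then some "Correct"
        else if PySem.Str.isIn "Incorrect" answer then some "Incorrect"
        else none
      else none)).getD "Status not found"

-- ===== PORT B =====
-- helper _classify of Source B
def pvClassify (line : String) : Option String :=
  if PySem.Str.isIn "Formalization Status:" line = false then none
  else
    let answer := PySem.Str.strip
      (List.getD ((PySem.Str.split? line "Formalization Status:").getD []) 1 "")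
    if PySem.Str.isIn "Correct" answer then some "Correct"
    else if PySem.Str.isIn "Incorrect" answer then some "Incorrect"
    else none

def parse_formalization_status_alt (response : String) : String :=
  let hits := (PySem.Str.splitlines response).filterMap pvClassify
  match hits.getLast? with
  | some h => h
  | none => "Status not found"

-- ===== PRECONDITION & SPEC =====
def Spec_parse_formalization_status (response : String) (out : String) : Prop := out = parse_formalization_status_alt response
instance (response : String) (out : String) : Decidable (Spec_parse_formalization_status response out) := by unfold Spec_parse_formalization_status; infer_instance

-- ===== CLAIM (what is proved, stated in full; the proofs are below) =====
def Claim_equal_parse_formalization_status : Prop := ∀ (response : String), Dom_parse_formalization_status response → Spec_parse_formalization_status response (parse_formalization_status response)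

-- ===== LEMMAS AND PROOFS =====

/-- A's inline per-line body is exactly B's helper `pvClassify`. -/
lemma pvBodyA_eq (line : String) :
    (if PySem.Str.isIn "Formalization Status:" line then
        let answer := PySem.Str.strip
          (List.getD ((PySem.Str.split? line "Formalization Status:").getD []) 1 "")
        if PySem.Str.isIn "Correct" answer then some "Correct"
        else if PySem.Str.isIn "Incorrect" answer then some "Incorrect"
        else (none : Option String)
      else none) = pvClassify line := by
  unfold pvClassify
  cases PySem.Str.isIn "Formalization Status:" line <;> rfl

/-- First hit over the reversed list = last hit of the collected list. -/
lemma pvFindSome_reverse_eq_getLast_filterMap (f : String → Option String) (ls : List String) :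
    ls.reverse.findSome? f = (ls.filterMap f).getLast? := by
  induction ls with
  | nil => rfl
  | cons l ls ih =>
      rw [List.reverse_cons, List.findSome?_append, ih, List.filterMap_cons]
      cases hf : f l with
      | none =>
          cases h : (ls.filterMap f).getLast? <;> simp [List.findSome?, hf]
      | some v =>
          cases h : (ls.filterMap f).getLast? with
          | some w =>
              rw [List.getLast?_cons, h]
              rfl
          | none =>
              rw [List.getLast?_eq_none_iff] at h
              simp [h, List.findSome?, hf]

/-- A's index list, run through the line lookup, is just `lines.reverse`. -/
lemma pvIndexMap_eq_reverse (lines : List String) :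
    (PySem.List.pyRange 1 ((lines.length : Int) + 1) 1).map
        (fun i => PySem.List.pyGetD lines ((lines.length : Int) - i) "")
      = lines.reverse := by
  have h1 : (PySem.List.pyRange 1 ((lines.length : Int) + 1) 1).map
        (fun i => ((lines.length : Int) - i))
      = PySem.List.pyRange ((lines.length : Int) - 1) (-1) (-1) := by
    rw [PySem.List.pyRange_one, PySem.List.pyRange_neg_one]
    have e1 : ((lines.length : Int) + 1 - 1).toNat = lines.length := by omega
    have e2 : ((lines.length : Int) - 1 - (-1)).toNat = lines.length := by omega
    rw [List.map_map, e1, e2]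
    apply List.map_congr_left
    intro k _
    simp only [Function.comp_apply]
    omega
  calc (PySem.List.pyRange 1 ((lines.length : Int) + 1) 1).map
        (fun i => PySem.List.pyGetD lines ((lines.length : Int) - i) "")
      = ((PySem.List.pyRange 1 ((lines.length : Int) + 1) 1).map
          (fun i => ((lines.length : Int) - i))).map
          (fun j => PySem.List.pyGetD lines j "") := by
        rw [List.map_map]; rfl
    _ = ((PySem.List.pyRange 0 ((lines.length : Int)) 1).reverse).map
          (fun j => PySem.List.pyGetD lines j "") := by
        rw [h1, PySem.List.pyRange_neg_one_eq_reverse]; norm_num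
    _ = lines.reverse := by
        rw [List.map_reverse, PySem.List.map_pyGetD_pyRange_zero']

-- ===== VERDICT (by name: the statement is the Claim_ definition above) =====
theorem parse_formalization_status_spec : Claim_equal_parse_formalization_status := by
  intro response _
  unfold Spec_parse_formalization_status parse_formalization_status parse_formalization_status_alt
  simp only []
  rw [show (PySem.List.pyRange 1 (((PySem.Str.splitlines response).length : Int) + 1) 1).findSome?
        (fun i =>
          let line := PySem.List.pyGetD (PySem.Str.splitlines response)
            (((PySem.Str.splitlines response).length : Int) - i) ""
          if PySem.Str.isIn "Formalization Status:" line then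
            let answer := PySem.Str.strip
              (List.getD ((PySem.Str.split? line "Formalization Status:").getD []) 1 "")
            if PySem.Str.isIn "Correct" answer then some "Correct"
            else if PySem.Str.isIn "Incorrect" answer then some "Incorrect"
            else none
          else none)
      = ((PySem.List.pyRange 1 (((PySem.Str.splitlines response).length : Int) + 1) 1).map
          (fun i => PySem.List.pyGetD (PySem.Str.splitlines response)
            (((PySem.Str.splitlines response).length : Int) - i) "")).findSome? pvClassify
      from by rw [List.findSome?_map]; congr 1; funext i; exact pvBodyA_eq _]
  rw [pvIndexMap_eq_reverse, pvFindSome_reverse_eq_getLast_filterMap]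
  cases ((PySem.Str.splitlines response).filterMap pvClassify).getLast? <;> rfl
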